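-- pv_equiv track=rewrite | github.com/sumanth-0/100LinesOfPythonCode | random_font_style_text/random_font_style_text.py | circled_text
-- ===== SOURCE A (Python) =====
-- def circled_text(text):
--     """Convert text to circled characters"""
--     circled_map = {}
--     # Circled uppercase A-Z (U+24B6 to U+24CF)
--     for i in range(26):
--         circled_map[chr(ord('A') + i)] = chr(0x24B6 + i)
--     # Circled lowercase uses same as uppercase
--     for i in range(26):
--         circled_map[chr(ord('a') + i)] = chr(0x24B6 + i)
--     # Circled numbers 0-9
--     for i in range(10):
--         circled_map[str(i)] = chr(0x2460 + i - 1) if i > 0 else '⓪'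
--
--     return ''.join(circled_map.get(char, char) for char in text)
-- ===== SOURCE B (Python) =====
-- def circled_text(text):
--     """Convert text to circled characters"""
--     def circle(ch):
--         n = ord(ch)
--         if 65 <= n <= 90 or 97 <= n <= 122:
--             return chr(0x24B6 + (n - 65) % 32)
--         if 48 <= n <= 57:
--             return '\u24EA' if n == 48 else chr(0x2460 + n - 49)
--         return ch
--
--     def go(s):
--         if len(s) <= 1:
--             return circle(s) if s else ''
--         m = len(s) // 2
--         return go(s[:m]) + go(s[m:])
--
--     return go(text)
-- ===== Notes on version B (the rewrite author's own statement) =====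
-- stated objective: alternative
-- what changed: Replaces A's precomputed 62-entry dict plus single left-to-right join with a recursive divide-and-conquer: split the string in halves, recurse, and at single characters compute the circled codepoint arithmetically (one shared (n-65)%32 formula for both letter cases).
import Mathlib
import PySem

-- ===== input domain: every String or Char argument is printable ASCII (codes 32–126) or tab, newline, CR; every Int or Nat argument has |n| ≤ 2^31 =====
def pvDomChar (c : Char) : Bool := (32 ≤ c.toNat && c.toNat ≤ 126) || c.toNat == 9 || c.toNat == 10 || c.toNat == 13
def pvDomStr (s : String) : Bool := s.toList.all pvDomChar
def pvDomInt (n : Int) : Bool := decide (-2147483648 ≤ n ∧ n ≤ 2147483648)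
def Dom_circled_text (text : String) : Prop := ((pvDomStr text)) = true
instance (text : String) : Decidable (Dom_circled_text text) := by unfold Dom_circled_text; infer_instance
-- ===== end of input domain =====

-- B replaces A's precomputed 62-entry dict + single join with a recursive divide-and-conquer
-- that computes each circled codepoint arithmetically at the single-character base case (alternative).

-- ===== PORT A =====
-- the dict built by A's three loops (keys/values are single chars, ported as Char)
def circledMapA : PySem.Dict Char Char :=
  let d := (PySem.List.pyRange 0 26 1).foldl
    (fun d i => d.insert (Char.ofNat ('A'.toNat + i.toNat)) (Char.ofNat (0x24B6 + i.toNat)))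
    PySem.Dict.empty
  let d := (PySem.List.pyRange 0 26 1).foldl
    (fun d i => d.insert (Char.ofNat ('a'.toNat + i.toNat)) (Char.ofNat (0x24B6 + i.toNat)))
    d
  (PySem.List.pyRange 0 10 1).foldl
    (fun d i => d.insert (Char.ofNat ('0'.toNat + i.toNat))
                         (if i > 0 then Char.ofNat (0x2460 + i.toNat - 1) else '⓪'))
    d

def circled_text (text : String) : String :=
  String.mk (text.toList.map (fun c => circledMapA.getD c c))

-- ===== PORT B =====
-- B's inner circle(ch): arithmetic on the code point, one shared formula for both letter cases
def circleB (c : Char) : Char :=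
  let n := c.toNat
  if (65 ≤ n ∧ n ≤ 90) ∨ (97 ≤ n ∧ n ≤ 122) then Char.ofNat (0x24B6 + (n - 65) % 32)
  else if 48 ≤ n ∧ n ≤ 57 then (if n = 48 then '⓪' else Char.ofNat (0x2460 + n - 49))
  else c

-- B's go(s): split in halves and recurse; s[:m]/s[m:] with 0 ≤ m ≤ len are exactly take/drop.
-- The Nat fuel (initially the length, strictly decreasing along halves) only makes the same
-- recursion structural; the fuel-0 arm with ≥ 2 chars is unreachable.
def goBAux : Nat → List Char → List Char
  | _, [] => []
  | _, [c] => [circleB c]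
  | Nat.succ f, l => goBAux f (l.take (l.length / 2)) ++ goBAux f (l.drop (l.length / 2))
  | 0, l => l

def goB (l : List Char) : List Char := goBAux l.length l

def circled_text_alt (text : String) : String :=
  String.mk (goB text.toList)

-- ===== PRECONDITION & SPEC =====
def Spec_circled_text (text : String) (out : String) : Prop := out = circled_text_alt text
instance (text : String) (out : String) : Decidable (Spec_circled_text text out) := by unfold Spec_circled_text; infer_instance

-- ===== CLAIM (what is proved, stated in full; the proofs are below) =====
def Claim_equal_circled_text : Prop := ∀ (text : String), Dom_circled_text text → Spec_circled_text text (circled_text text)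

-- ===== LEMMAS AND PROOFS =====

-- goB is the per-character map circleB
lemma goBAux_eq_map (f : Nat) : ∀ (l : List Char), l.length ≤ f → goBAux f l = l.map circleB := by
  induction f with
  | zero =>
    intro l h
    match l, h with
    | [], _ => rfl
  | succ f ih =>
    intro l h
    match l with
    | [] => rfl
    | [c] => rfl
    | a :: b :: t =>
      show goBAux f _ ++ goBAux f _ = _
      have hlen : (a :: b :: t).length = t.length + 2 := by simp
      rw [ih _ (by simp [List.length_take]; omega), ih _ (by simp; omega),
        ← List.map_append, List.take_append_drop]

lemma goB_eq_map (l : List Char) : goB l = l.map circleB := goBAux_eq_map l.length l le_rfl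

-- the two per-character functions agree on every domain character (checked over all 127 codes)
set_option maxRecDepth 4096 in
lemma per_char_all :
    (List.range 127).all (fun n => circledMapA.getD (Char.ofNat n) (Char.ofNat n) == circleB (Char.ofNat n)) = true := by
  decide

set_option maxRecDepth 4096 in
lemma per_char (c : Char) (h : pvDomChar c = true) :
    circledMapA.getD c c = circleB c := by
  have hlt : c.toNat < 127 := by
    simp [pvDomChar] at h
    omega
  have h2 := List.all_eq_true.mp per_char_all c.toNat (List.mem_range.mpr hlt)
  simp only [beq_iff_eq, Char.ofNat_toNat] at h2
  exact h2

-- ===== VERDICT (by name: the statement is the Claim_ definition above) =====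
theorem circled_text_spec : Claim_equal_circled_text := by
  intro text hdom
  unfold Dom_circled_text pvDomStr at hdom
  unfold Spec_circled_text circled_text circled_text_alt
  rw [goB_eq_map]
  rw [List.map_congr_left (fun c hc => per_char c (List.all_eq_true.mp hdom c hc))]
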